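-- pv_equiv track=rewrite | github.com/vivaansinghvi07/unisci | unisci/metric.py | metric_base
-- ===== SOURCE A (Python) =====
-- METRIC_CONVERSIONS = {
--     'y': 1e-24,
--     'z': 1e-21,
--     'a': 1e-18,
--     'f': 1e-15,
--     'p': 1e-12,
--     'n': 1e-9,
--     'µ': 1e-6,
--     'mc': 1e-6,     # for those who cannot use the µ symbol
--     'u': 1e-6,      # alternate option
--     'm': 1e-3,
--     'c': 1e-2,
--     'd': 1e-1,
--     'da': 1e1,
--     'h': 1e2,
--     'k': 1e3,
--     'M': 1e6,
--     'G': 1e9,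
--     'T': 1e12,
--     'P': 1e15,
--     'E': 1e18,
--     'Z': 1e21,
--     'Y': 1e24
-- }
--
-- METRIC_UNITS = ['s', 'm', 'g', 'K', 'mol', 'J', 'W', 'N', 'Pa', 'L']     # the ones that are currently supported
--
-- def metric_base(unit: str) -> str:
--     """
--     Returns the base metric SI unit of the unit. If the unit is not metric, returns the unit itself.
--     """
--     for base in METRIC_UNITS:
--         # try-except block for if the tested base is longer than the unit
--         try:
--             test_base = unit[-len(base):]
--             if test_base == base:
--                 if unit[:-len(base)] in METRIC_CONVERSIONS:
--                     return test_base
--                 else: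
--                     return unit     # options: 1) base is taken and incorrect, 2) base is already at base form
--             else:
--                 continue    # checks another base
--         except:
--             continue
--
--     # if no base matches (most likely option)
--     return unit
-- ===== SOURCE B (Python) =====
-- METRIC_CONVERSIONS = {
--     'y': 1e-24,
--     'z': 1e-21,
--     'a': 1e-18,
--     'f': 1e-15,
--     'p': 1e-12,
--     'n': 1e-9,
--     'µ': 1e-6,
--     'mc': 1e-6,     # for those who cannot use the µ symbol
--     'u': 1e-6,      # alternate option
--     'm': 1e-3,
--     'c': 1e-2,
--     'd': 1e-1,
--     'da': 1e1,
--     'h': 1e2,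
--     'k': 1e3,
--     'M': 1e6,
--     'G': 1e9,
--     'T': 1e12,
--     'P': 1e15,
--     'E': 1e18,
--     'Z': 1e21,
--     'Y': 1e24
-- }
--
-- METRIC_UNITS = ['s', 'm', 'g', 'K', 'mol', 'J', 'W', 'N', 'Pa', 'L']
--
-- _BASE_SET = frozenset(METRIC_UNITS)
--
-- def metric_base(unit: str) -> str:
--     """
--     Returns the base metric SI unit of the unit. If the unit is not metric, returns the unit itself.
--     """
--     # Scan the metric prefixes instead of the base units: a metric unit is
--     # exactly <prefix> + <base unit>, and no base unit is a suffix of another,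
--     # so such a decomposition is unique when it exists.
--     for prefix in METRIC_CONVERSIONS:
--         if unit.startswith(prefix):
--             rest = unit[len(prefix):]
--             if rest in _BASE_SET:
--                 return rest
--     return unit
-- ===== Notes on version B (the rewrite author's own statement) =====
-- stated objective: alternative
-- what changed: B scans the metric-prefix table and tests prefix + base-unit-set membership (unit.startswith(prefix), remainder in a precomputed frozenset of base units), instead of A's scan over base units testing negative-index suffix slices with a key lookup in the conversions dict inside a try/except.
import Mathlib
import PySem

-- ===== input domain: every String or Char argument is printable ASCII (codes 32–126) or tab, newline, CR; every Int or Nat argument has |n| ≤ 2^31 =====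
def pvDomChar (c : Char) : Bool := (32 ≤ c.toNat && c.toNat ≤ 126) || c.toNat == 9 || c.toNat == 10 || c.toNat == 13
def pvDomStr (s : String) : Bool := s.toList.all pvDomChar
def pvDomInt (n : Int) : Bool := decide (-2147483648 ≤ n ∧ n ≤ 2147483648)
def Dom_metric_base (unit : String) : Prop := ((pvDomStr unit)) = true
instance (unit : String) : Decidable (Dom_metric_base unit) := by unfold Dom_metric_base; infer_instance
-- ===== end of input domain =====

-- B strips the metric prefix by scanning the prefix table against a precomputed base-unit set,
-- instead of A's scan over base units testing suffixes; objective: alternative decomposition.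

-- ===== PORT A =====
-- Keys of METRIC_CONVERSIONS in insertion order; the dict's Float values are never used by
-- metric_base (only `in` = key membership), so only the keys are ported.
def METRIC_CONVERSIONS_KEYS : List String :=
  ["y", "z", "a", "f", "p", "n", "µ", "mc", "u", "m", "c", "d", "da", "h", "k",
   "M", "G", "T", "P", "E", "Z", "Y"]

def METRIC_UNITS : List String := ["s", "m", "g", "K", "mol", "J", "W", "N", "Pa", "L"]

-- the `for base in METRIC_UNITS` loop with its early returns; A's try/except guards the
-- slicing, which never raises in Python (slices are total), so it is ported as a plain scan
def metricBaseLoop (unit : String) : List String → String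
  | [] => unit                                   -- if no base matches (most likely option)
  | base :: rest =>
    let test_base := PySem.Str.slice unit (some (-(PySem.Str.len base))) none
    if test_base = base then
      if METRIC_CONVERSIONS_KEYS.contains
          (PySem.Str.slice unit none (some (-(PySem.Str.len base)))) then
        test_base
      else
        unit
    else
      metricBaseLoop unit rest

def metric_base (unit : String) : String := metricBaseLoop unit METRIC_UNITS

-- ===== PORT B =====
def BASE_SET : PySem.Set String := PySem.Set.ofList METRIC_UNITS

-- the `for prefix in METRIC_CONVERSIONS` loop of Source B
def metricBaseAltLoop (unit : String) : List String → String
  | [] => unit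
  | pre :: rest =>
    if PySem.Str.startswith unit pre then
      let r := PySem.Str.slice unit (some (PySem.Str.len pre)) none
      if BASE_SET.contains r then r else metricBaseAltLoop unit rest
    else
      metricBaseAltLoop unit rest

def metric_base_alt (unit : String) : String :=
  metricBaseAltLoop unit METRIC_CONVERSIONS_KEYS

-- ===== PRECONDITION & SPEC =====
def Spec_metric_base (unit : String) (out : String) : Prop := out = metric_base_alt unit
instance (unit : String) (out : String) : Decidable (Spec_metric_base unit out) := by unfold Spec_metric_base; infer_instance

-- ===== CLAIM (what is proved, stated in full; the proofs are below) =====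
def Claim_equal_metric_base : Prop := ∀ (unit : String), Dom_metric_base unit → Spec_metric_base unit (metric_base unit)

-- ===== LEMMAS AND PROOFS =====

-- A's suffix test `unit[-len(base):] == base` holds exactly when base is a suffix of unit
theorem condA_iff (l : List Char) (b : String) (hb : 0 < b.toList.length) :
    (PySem.Str.slice (String.ofList l) (some (-(PySem.Str.len b))) none = b) ↔ b.toList <:+ l := by
  rw [← String.toList_inj]
  simp only [PySem.Str.slice, PySem.Str.len, String.toList_ofList,
    PySem.Chars.slice_eq_listSlice]
  rw [PySem.List.slice_from_neg_natCast l b.toList.length hb]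
  constructor
  · intro h; rw [← h]; exact List.drop_suffix _ l
  · intro h; exact (List.suffix_iff_eq_drop.mp h).symm

-- the prefix part `unit[:-len(base)]` at character level
theorem prefixA_toList (l : List Char) (b : String) (hb : 0 < b.toList.length) :
    (PySem.Str.slice (String.ofList l) none (some (-(PySem.Str.len b)))).toList
      = l.take (l.length - b.toList.length) := by
  simp only [PySem.Str.slice, PySem.Str.len, String.toList_ofList,
    PySem.Chars.slice_eq_listSlice]
  exact PySem.List.slice_to_neg_natCast l b.toList.length hb

-- B's rest `unit[len(prefix):]` at character level
theorem restB_toList (l : List Char) (p : String) :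
    (PySem.Str.slice (String.ofList l) (some (PySem.Str.len p)) none).toList
      = l.drop p.toList.length := by
  simp only [PySem.Str.slice, PySem.Str.len, String.toList_ofList,
    PySem.Chars.slice_eq_listSlice]
  exact PySem.List.slice_from_natCast l p.toList.length

-- A's loop returns unit when no base decomposes
theorem loopA_id (u : String) (bases : List String)
    (h : ∀ b ∈ bases, PySem.Str.slice u (some (-(PySem.Str.len b))) none = b →
      METRIC_CONVERSIONS_KEYS.contains
        (PySem.Str.slice u none (some (-(PySem.Str.len b)))) = false) :
    metricBaseLoop u bases = u := by
  induction bases with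
  | nil => rfl
  | cons b bs ih =>
    simp only [metricBaseLoop]
    by_cases h1 : PySem.Str.slice u (some (-(PySem.Str.len b))) none = b
    · rw [if_pos h1, if_neg (by rw [h b List.mem_cons_self h1]; decide)]
    · rw [if_neg h1]
      exact ih (fun b' hb' => h b' (List.mem_cons_of_mem _ hb'))

-- A's loop returns the base at the unique matching base
theorem loopA_hit (u : String) (bases : List String) (b : String)
    (hmem : b ∈ bases)
    (htb : PySem.Str.slice u (some (-(PySem.Str.len b))) none = b)
    (hkey : METRIC_CONVERSIONS_KEYS.contains
      (PySem.Str.slice u none (some (-(PySem.Str.len b)))) = true)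
    (hothers : ∀ b' ∈ bases, b' ≠ b →
      PySem.Str.slice u (some (-(PySem.Str.len b'))) none ≠ b') :
    metricBaseLoop u bases = b := by
  induction bases with
  | nil => cases hmem
  | cons b0 bs ih =>
    simp only [metricBaseLoop]
    by_cases e : b0 = b
    · subst e
      rw [if_pos htb, if_pos (by simpa using hkey)]
      exact htb
    · have hne := hothers b0 (List.mem_cons_self) e
      rw [if_neg hne]
      rcases List.mem_cons.mp hmem with h' | h'
      · exact absurd h'.symm e
      · exact ih h' (fun b' hb' => hothers b' (List.mem_cons_of_mem _ hb'))

-- B's loop returns unit when no prefix decomposes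
theorem loopB_id (u : String) (ps : List String)
    (h : ∀ p ∈ ps, PySem.Str.startswith u p = true →
      BASE_SET.contains (PySem.Str.slice u (some (PySem.Str.len p)) none) = false) :
    metricBaseAltLoop u ps = u := by
  induction ps with
  | nil => rfl
  | cons p ps' ih =>
    simp only [metricBaseAltLoop]
    by_cases h1 : PySem.Str.startswith u p = true
    · rw [if_pos h1, if_neg (by rw [h p List.mem_cons_self h1]; decide)]
      exact ih (fun p' hp' => h p' (List.mem_cons_of_mem _ hp'))
    · rw [if_neg h1]
      exact ih (fun p' hp' => h p' (List.mem_cons_of_mem _ hp'))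

-- B's loop returns the rest at the unique matching prefix
theorem loopB_hit (u : String) (ps : List String) (p : String)
    (hmem : p ∈ ps)
    (hsw : PySem.Str.startswith u p = true)
    (hbase : BASE_SET.contains (PySem.Str.slice u (some (PySem.Str.len p)) none) = true)
    (hothers : ∀ p' ∈ ps, p' ≠ p →
      ¬(PySem.Str.startswith u p' = true ∧
        BASE_SET.contains (PySem.Str.slice u (some (PySem.Str.len p')) none) = true)) :
    metricBaseAltLoop u ps = PySem.Str.slice u (some (PySem.Str.len p)) none := by
  induction ps with
  | nil => cases hmem
  | cons p0 ps' ih =>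
    simp only [metricBaseAltLoop]
    by_cases e : p0 = p
    · subst e
      rw [if_pos hsw, if_pos hbase]
    · have hno := hothers p0 List.mem_cons_self e
      by_cases h1 : PySem.Str.startswith u p0 = true
      · have h2 : BASE_SET.contains
            (PySem.Str.slice u (some (PySem.Str.len p0)) none) = false := by
          by_contra hc
          exact hno ⟨h1, by simpa using hc⟩
        rw [if_pos h1, if_neg (by rw [h2]; decide)]
        rcases List.mem_cons.mp hmem with h' | h'
        · exact absurd h'.symm e
        · exact ih h' (fun p' hp' => hothers p' (List.mem_cons_of_mem _ hp'))
      · rw [if_neg h1]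
        rcases List.mem_cons.mp hmem with h' | h'
        · exact absurd h'.symm e
        · exact ih h' (fun p' hp' => hothers p' (List.mem_cons_of_mem _ hp'))

-- small decidable facts about the two literal tables
theorem units_pos : ∀ b ∈ METRIC_UNITS, 0 < b.toList.length := by decide

theorem units_no_suffix :
    ∀ b1 ∈ METRIC_UNITS, ∀ b2 ∈ METRIC_UNITS, b1.toList <:+ b2.toList → b1 = b2 := by decide

-- both programs return the base at the (unique) decomposition prefix ++ base
theorem suffix_unique (l : List Char) (b b' : String)
    (hb : b ∈ METRIC_UNITS) (hb' : b' ∈ METRIC_UNITS)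
    (h1 : b.toList <:+ l) (h2 : b'.toList <:+ l) : b' = b := by
  by_cases hle : b'.toList.length ≤ b.toList.length
  · exact units_no_suffix b' hb' b hb (List.suffix_of_suffix_length_le h2 h1 hle)
  · exact (units_no_suffix b hb b' hb'
      (List.suffix_of_suffix_length_le h1 h2 (by omega))).symm

theorem main_eq (l : List Char) :
    metric_base (String.ofList l) = metric_base_alt (String.ofList l) := by
  by_cases hD : ∃ p ∈ METRIC_CONVERSIONS_KEYS, ∃ b ∈ METRIC_UNITS,
      l = p.toList ++ b.toList
  · obtain ⟨p, hp, b, hb, rfl⟩ := hD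
    have hbpos : 0 < b.toList.length := units_pos b hb
    have hsuf : b.toList <:+ p.toList ++ b.toList := List.suffix_append _ _
    have htb : PySem.Str.slice (String.ofList (p.toList ++ b.toList))
        (some (-(PySem.Str.len b))) none = b := (condA_iff _ b hbpos).mpr hsuf
    have hpre : (PySem.Str.slice (String.ofList (p.toList ++ b.toList)) none
        (some (-(PySem.Str.len b)))).toList = p.toList := by
      rw [prefixA_toList _ b hbpos]
      simp
    have hkey : METRIC_CONVERSIONS_KEYS.contains
        (PySem.Str.slice (String.ofList (p.toList ++ b.toList)) none
          (some (-(PySem.Str.len b)))) = true := by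
      have : PySem.Str.slice (String.ofList (p.toList ++ b.toList)) none
          (some (-(PySem.Str.len b))) = p := String.toList_inj.mp hpre
      rw [this]
      exact List.contains_iff_mem.mpr hp
    have hA : metric_base (String.ofList (p.toList ++ b.toList)) = b := by
      apply loopA_hit _ _ b hb htb hkey
      intro b' hb'mem hne hcond
      exact hne (suffix_unique _ b b' hb hb'mem hsuf
        ((condA_iff _ b' (units_pos b' hb'mem)).mp hcond))
    have hrest : (PySem.Str.slice (String.ofList (p.toList ++ b.toList))
        (some (PySem.Str.len p)) none).toList = b.toList := by
      rw [restB_toList]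
      simp
    have hreq : PySem.Str.slice (String.ofList (p.toList ++ b.toList))
        (some (PySem.Str.len p)) none = b := String.toList_inj.mp hrest
    have hsw : PySem.Str.startswith (String.ofList (p.toList ++ b.toList)) p = true := by
      simp only [PySem.Str.startswith, String.toList_ofList]
      exact (PySem.Chars.startswith_iff _ _).mpr (List.prefix_append _ _)
    have hbase : BASE_SET.contains (PySem.Str.slice (String.ofList (p.toList ++ b.toList))
        (some (PySem.Str.len p)) none) = true := by
      rw [hreq, PySem.Set.contains_iff, BASE_SET, PySem.Set.mem_ofList]
      exact hb
    have hB : metric_base_alt (String.ofList (p.toList ++ b.toList)) = b := by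
      have := loopB_hit (String.ofList (p.toList ++ b.toList))
        METRIC_CONVERSIONS_KEYS p hp hsw hbase ?_
      · rw [metric_base_alt, this, hreq]
      · intro p' hp'mem hne ⟨hsw', hbase'⟩
        -- p' also decomposes the input: derive a second decomposition and contradict
        have hr' : (PySem.Str.slice (String.ofList (p.toList ++ b.toList))
            (some (PySem.Str.len p')) none).toList
              = (p.toList ++ b.toList).drop p'.toList.length := restB_toList _ p'
        have hmem' : PySem.Str.slice (String.ofList (p.toList ++ b.toList))
            (some (PySem.Str.len p')) none ∈ METRIC_UNITS := by
          rw [PySem.Set.contains_iff, BASE_SET, PySem.Set.mem_ofList] at hbase'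
          exact hbase'
        set r' := PySem.Str.slice (String.ofList (p.toList ++ b.toList))
            (some (PySem.Str.len p')) none with hr'def
        have hr'suf : r'.toList <:+ p.toList ++ b.toList := by
          rw [hr']; exact List.drop_suffix _ _
        have hr'b : r' = b := suffix_unique _ b r' hb hmem' hsuf hr'suf
        -- equal rests force equal prefix lengths, hence equal prefixes
        have hlen : p'.toList.length = p.toList.length := by
          have h1 : (p.toList ++ b.toList).length - p'.toList.length
              = b.toList.length := by
            rw [← List.length_drop, ← hr', hr'b]
          have h2 : p'.toList.length ≤ (p.toList ++ b.toList).length := by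
            have := (PySem.Chars.startswith_iff _ _).mp (by
              simpa [PySem.Str.startswith] using hsw')
            simpa using this.length_le
          simp only [List.length_append] at h1 h2
          omega
        have hpp : p'.toList <+: p.toList ++ b.toList := by
          have := (PySem.Chars.startswith_iff _ _).mp (by
            simpa [PySem.Str.startswith] using hsw')
          simpa using this
        have hpp2 : p.toList <+: p.toList ++ b.toList := List.prefix_append _ _
        have : p'.toList = p.toList := by
          have h3 := List.prefix_of_prefix_length_le hpp hpp2
            (by rw [hlen])
          exact h3.eq_of_length hlen
        exact hne (String.toList_inj.mp this)
    rw [hA, hB]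
  · -- no prefix+base decomposition: both sides return the unit unchanged
    have hA : metric_base (String.ofList l) = String.ofList l := by
      apply loopA_id
      intro b hbmem htb
      by_contra hc
      have hkey : METRIC_CONVERSIONS_KEYS.contains
          (PySem.Str.slice (String.ofList l) none (some (-(PySem.Str.len b)))) = true := by
        simpa using hc
      have hsuf := (condA_iff l b (units_pos b hbmem)).mp htb
      have hdrop := List.suffix_iff_eq_drop.mp hsuf
      refine hD ⟨_, List.contains_iff_mem.mp hkey, b, hbmem, ?_⟩
      rw [prefixA_toList l b (units_pos b hbmem)]
      conv_lhs => rw [← List.take_append_drop (l.length - b.toList.length) l]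
      rw [← hdrop]
    have hB : metric_base_alt (String.ofList l) = String.ofList l := by
      apply loopB_id
      intro p hpmem hsw
      by_contra hc
      have hbase : BASE_SET.contains
          (PySem.Str.slice (String.ofList l) (some (PySem.Str.len p)) none) = true := by
        simpa using hc
      have hmem' : PySem.Str.slice (String.ofList l) (some (PySem.Str.len p)) none
          ∈ METRIC_UNITS := by
        rw [PySem.Set.contains_iff, BASE_SET, PySem.Set.mem_ofList] at hbase
        exact hbase
      have hpre : p.toList <+: l := by
        simpa [PySem.Str.startswith] using
          (PySem.Chars.startswith_iff l p.toList).mp (by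
            simpa [PySem.Str.startswith] using hsw)
      refine hD ⟨p, hpmem, _, hmem', ?_⟩
      rw [restB_toList l p]
      conv_lhs => rw [← List.take_append_drop p.toList.length l]
      rw [← List.prefix_iff_eq_take.mp hpre]
    rw [hA, hB]

-- ===== VERDICT (by name: the statement is the Claim_ definition above) =====
theorem metric_base_spec : Claim_equal_metric_base := by
  intro unit _
  unfold Spec_metric_base
  have h := main_eq unit.toList
  rwa [String.ofList_toList] at h
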